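-- pv_equiv track=rewrite | github.com/nexi-lab/nexus | src/nexus/bricks/rebac/path_updater.py | _matches_any_candidate
-- ===== SOURCE A (Python) =====
-- def _matches_any_candidate(
--
--     stored_path: str,
--     candidates: list[str],
--     is_directory: bool,
-- ) -> bool:
--     for candidate in candidates:
--         if stored_path == candidate:
--             return True
--         if is_directory and stored_path.startswith(candidate + "/"):
--             return True
--     return False
-- ===== SOURCE B (Python) =====
-- def _matches_any_candidate(
--     stored_path: str,
--     candidates: list[str],
--     is_directory: bool,
-- ) -> bool:
--     cset = set(candidates)
--     if stored_path in cset: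
--         return True
--     if not is_directory:
--         return False
--     return any(
--         stored_path[:i] in cset
--         for i, ch in enumerate(stored_path)
--         if ch == "/"
--     )
-- ===== Notes on version B (the rewrite author's own statement) =====
-- stated objective: alternative
-- what changed: Instead of scanning every candidate and running a startswith test per candidate, B builds a hash set of candidates once and probes it with the exact path and with each slash-boundary prefix of stored_path; it trades the per-candidate scan for a per-slash prefix probe.
import Mathlib
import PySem

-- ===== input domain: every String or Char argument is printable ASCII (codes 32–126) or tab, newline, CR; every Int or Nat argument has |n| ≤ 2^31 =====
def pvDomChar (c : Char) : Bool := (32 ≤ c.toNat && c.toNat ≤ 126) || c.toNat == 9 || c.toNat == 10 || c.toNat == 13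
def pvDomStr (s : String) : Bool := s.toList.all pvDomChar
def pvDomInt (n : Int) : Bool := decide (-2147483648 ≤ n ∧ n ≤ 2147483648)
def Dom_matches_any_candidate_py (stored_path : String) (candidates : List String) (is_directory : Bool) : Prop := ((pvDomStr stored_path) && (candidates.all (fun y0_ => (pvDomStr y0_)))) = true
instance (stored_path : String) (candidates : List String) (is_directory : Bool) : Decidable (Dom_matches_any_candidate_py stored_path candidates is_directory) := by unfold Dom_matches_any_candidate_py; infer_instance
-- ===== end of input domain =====

-- B replaces A's per-candidate scan (equality or startswith each candidate) by one hash set of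
-- candidates probed with the exact path and with each slash-boundary prefix of stored_path (alternative algorithm).

-- ===== PORT A =====
-- the 'for candidate in candidates' loop with its two early returns
def pvGoA (stored_path : String) (is_directory : Bool) : List String → Bool
  | [] => false
  | c :: rest =>
    if stored_path == c then true
    else if is_directory && PySem.Str.startswith stored_path (c ++ "/") then true
    else pvGoA stored_path is_directory rest

def matches_any_candidate_py (stored_path : String) (candidates : List String) (is_directory : Bool) : Bool :=
  pvGoA stored_path is_directory candidates

-- ===== PORT B =====
def matches_any_candidate_py_alt (stored_path : String) (candidates : List String) (is_directory : Bool) : Bool :=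
  let cset : PySem.Set String := PySem.Set.ofList candidates
  if PySem.Set.contains cset stored_path then true
  else if !is_directory then false
  else (PySem.List.enumerate stored_path.toList 0).any
        (fun p => p.2 == '/' && PySem.Set.contains cset (PySem.Str.slice stored_path none (some p.1)))

-- ===== PRECONDITION & SPEC =====
def Spec_matches_any_candidate_py (stored_path : String) (candidates : List String) (is_directory : Bool) (out : Bool) : Prop := out = matches_any_candidate_py_alt stored_path candidates is_directory
instance (stored_path : String) (candidates : List String) (is_directory : Bool) (out : Bool) : Decidable (Spec_matches_any_candidate_py stored_path candidates is_directory out) := by unfold Spec_matches_any_candidate_py; infer_instance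

-- ===== CLAIM (what is proved, stated in full; the proofs are below) =====
def Claim_equal_matches_any_candidate_py : Prop := ∀ (stored_path : String) (candidates : List String) (is_directory : Bool), Dom_matches_any_candidate_py stored_path candidates is_directory → Spec_matches_any_candidate_py stored_path candidates is_directory (matches_any_candidate_py stored_path candidates is_directory)

-- ===== LEMMAS AND PROOFS =====

-- A's loop returns true iff some candidate matches exactly or (in directory mode) is a slash-prefix
theorem pvGoA_eq_true_iff (s : String) (d : Bool) (cs : List String) :
    pvGoA s d cs = true ↔
      ∃ c ∈ cs, s = c ∨ (d = true ∧ (c.toList ++ ['/']) <+: s.toList) := by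
  induction cs with
  | nil => simp [pvGoA]
  | cons c rest ih =>
    simp only [pvGoA]
    split_ifs with h1 h2
    · have hsc : s = c := by simpa using h1
      simp only [true_iff]
      exact ⟨c, by simp, Or.inl hsc⟩
    · simp only [Bool.and_eq_true] at h2
      constructor
      · intro _
        exact ⟨c, by simp, Or.inr ⟨h2.1, by
          have := (PySem.Chars.startswith_iff _ _).1 (by simpa using h2.2)
          simpa using this⟩⟩
      · intro _; rfl
    · rw [ih]
      constructor
      · rintro ⟨x, hx, hor⟩; exact ⟨x, by simp [hx], hor⟩
      · rintro ⟨x, hx, hor⟩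
        rcases List.mem_cons.1 hx with rfl | hx'
        · exfalso
          rcases hor with rfl | ⟨hd, hpre⟩
          · exact h1 (by simp)
          · exact h2 (by
              simp only [Bool.and_eq_true]
              refine ⟨hd, ?_⟩
              simp only [PySem.Str.startswith_eq]
              exact (PySem.Chars.startswith_iff _ _).2 (by simpa using hpre))
        · exact ⟨x, hx', hor⟩

-- (l ++ ['/']) is a prefix of t iff some index k holds '/' and t.take k = l (namely k = l.length)
theorem pvSlashPrefix_iff (l t : List Char) :
    (l ++ ['/']) <+: t ↔ ∃ k, ∃ h : k < t.length, t[k] = '/' ∧ t.take k = l := by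
  constructor
  · rintro ⟨rest, hrest⟩
    have hform : t = l ++ '/' :: rest := by rw [← hrest]; simp
    subst hform
    refine ⟨l.length, by simp, ?_, ?_⟩
    · have h0 : (l ++ '/' :: rest)[l.length]? = some '/' := by
        rw [List.getElem?_append_right (le_refl _)]; simp
      simpa using h0
    · exact List.take_left
  · rintro ⟨k, hk, hsl, htake⟩
    refine ⟨t.drop (k + 1), ?_⟩
    have h1 : t.take (k + 1) = l ++ ['/'] := by
      rw [List.take_add_one, htake, List.getElem?_eq_getElem hk, hsl]
      rfl
    calc l ++ ['/'] ++ t.drop (k + 1) = t.take (k + 1) ++ t.drop (k + 1) := by rw [h1]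
      _ = t := List.take_append_drop _ _

-- B's slice stored_path[:k] has the characters take k
theorem pvSlice_toList (s : String) (k : Nat) :
    (PySem.Str.slice s none (some (k : Int))).toList = s.toList.take k := by
  simp [PySem.Str.slice, PySem.Chars.slice_eq_listSlice, PySem.List.slice_to_natCast]

theorem pvB_eq_true_iff (s : String) (cs : List String) (d : Bool) :
    matches_any_candidate_py_alt s cs d = true ↔
      s ∈ cs ∨ (d = true ∧ ∃ k, ∃ h : k < s.toList.length,
        s.toList[k] = '/' ∧ String.ofList (s.toList.take k) ∈ cs) := by
  unfold matches_any_candidate_py_alt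
  simp only []
  by_cases h1 : s ∈ cs
  · have hc : PySem.Set.contains (PySem.Set.ofList cs) s = true := by
      rw [PySem.Set.contains_iff, PySem.Set.mem_ofList]; exact h1
    simp [h1]
  · have hc : PySem.Set.contains (PySem.Set.ofList cs) s = false := by
      rw [Bool.eq_false_iff]
      intro hq
      exact h1 (by rwa [PySem.Set.contains_iff, PySem.Set.mem_ofList] at hq)
    cases d with
    | false => simp [h1]
    | true =>
      simp only [hc, Bool.false_eq_true, if_false, Bool.not_true]
      simp only [List.any_eq_true, Bool.and_eq_true, beq_iff_eq]
      constructor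
      · rintro ⟨p, hp, hslash, hin⟩
        rcases ((PySem.List.mem_enumerate_iff _ _ _).1 hp) with ⟨k, hk, rfl⟩
        refine Or.inr ⟨by trivial, k, hk, by simpa using hslash, ?_⟩
        rw [PySem.Set.contains_iff, PySem.Set.mem_ofList] at hin
        have heq : PySem.Str.slice s none (some ((0 : Int) + (k : Int))) = String.ofList (s.toList.take k) := by
          apply String.toList_injective
          rw [show ((0 : Int) + (k : Int)) = (k : Int) by ring]
          rw [pvSlice_toList, String.toList_ofList]
        rwa [heq] at hin
      · rintro (hmem' | ⟨_, k, hk, hslash, hin⟩)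
        · exact absurd hmem' h1
        · refine ⟨((k : Int), s.toList[k]), ?_, by simpa using hslash, ?_⟩
          · exact (PySem.List.mem_enumerate_iff _ _ _).2 ⟨k, hk, by simp⟩
          · rw [PySem.Set.contains_iff, PySem.Set.mem_ofList]
            have heq : PySem.Str.slice s none (some (k : Int)) = String.ofList (s.toList.take k) := by
              apply String.toList_injective
              rw [pvSlice_toList, String.toList_ofList]
            rwa [heq]

-- A true iff B's condition
theorem pvA_eq_B (s : String) (cs : List String) (d : Bool) :
    matches_any_candidate_py s cs d = matches_any_candidate_py_alt s cs d := by
  have hiff : matches_any_candidate_py s cs d = true ↔ matches_any_candidate_py_alt s cs d = true := by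
    unfold matches_any_candidate_py
    rw [pvGoA_eq_true_iff, pvB_eq_true_iff]
    constructor
    · rintro ⟨c, hc, rfl | ⟨hd, hpre⟩⟩
      · exact Or.inl hc
      · rcases (pvSlashPrefix_iff c.toList s.toList).1 hpre with ⟨k, hk, hsl, htake⟩
        refine Or.inr ⟨hd, k, hk, hsl, ?_⟩
        have : String.ofList (s.toList.take k) = c := by
          apply String.toList_injective
          rw [String.toList_ofList]; exact htake
        rwa [this]
    · rintro (hmem | ⟨hd, k, hk, hsl, hin⟩)
      · exact ⟨s, hmem, Or.inl rfl⟩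
      · refine ⟨String.ofList (s.toList.take k), hin, Or.inr ⟨hd, ?_⟩⟩
        rw [pvSlashPrefix_iff]
        exact ⟨k, hk, hsl, by rw [String.toList_ofList]⟩
  cases hA : matches_any_candidate_py s cs d
  · cases hB : matches_any_candidate_py_alt s cs d
    · rfl
    · exact absurd (hiff.2 hB) (by simp [hA])
  · exact (hiff.1 hA).symm

-- ===== VERDICT (by name: the statement is the Claim_ definition above) =====
theorem matches_any_candidate_py_spec : Claim_equal_matches_any_candidate_py := by
  intro s cs d _
  unfold Spec_matches_any_candidate_py
  exact pvA_eq_B s cs d
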